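-- pv_equiv track=rewrite | github.com/RajK853/DRL-GEC | src/utils.py | filter_by_order
-- ===== SOURCE A (Python) =====
-- def filter_by_order(labels, label_types=None):
--     def has_label_type(l_type):
--         return any(label.startswith(l_type) for label in labels)
--
--     def filter_labels(l_type):
--         return [label if label.startswith(l_type) else "$KEEP" for label in labels]
--
--     if label_types is None:
--         label_types = ["$APPEND", "$MERGE", "$TRANSFORM", "$REPLACE", "DELETE"]
--     for label_type in label_types:
--         if has_label_type(label_type):
--             return filter_labels(label_type)
--     return labels
-- ===== SOURCE B (Python) =====
-- def filter_by_order(labels, label_types=None):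
--     if label_types is None:
--         label_types = ["$APPEND", "$MERGE", "$TRANSFORM", "$REPLACE", "DELETE"]
--     # Transposed traversal: one pass over the labels (outer), finding for each
--     # label its first matching label_type, and keeping the globally earliest
--     # (minimum index) matched type.  Indices at or beyond the current best can
--     # never win, so each label's scan stops there.  A instead scans type-major,
--     # with two passes over labels per type.
--     best = None  # (index, type) of the earliest label_type matched by any label
--     for label in labels:
--         cand = None
--         for i, t in enumerate(label_types):
--             if best is not None and best[0] <= i:
--                 break
--             if label.startswith(t):
--                 cand = (i, t)
--                 break
--         if cand is not None and (best is None or cand[0] < best[0]):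
--             best = cand
--     if best is None:
--         return labels
--     t = best[1]
--     return [label if label.startswith(t) else "$KEEP" for label in labels]
-- ===== Notes on version B (the rewrite author's own statement) =====
-- stated objective: alternative
-- what changed: Transposed the loop nesting: instead of A's type-major search (for each label_type, two passes over labels via any() and a comprehension), B makes one label-major pass computing each label's first matching type index, bounded by the current best since larger indices cannot win, and keeps the global minimum (the minimum over labels of first-match indices is exactly the first type matched by any label), then builds the output once.
import Mathlib
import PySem

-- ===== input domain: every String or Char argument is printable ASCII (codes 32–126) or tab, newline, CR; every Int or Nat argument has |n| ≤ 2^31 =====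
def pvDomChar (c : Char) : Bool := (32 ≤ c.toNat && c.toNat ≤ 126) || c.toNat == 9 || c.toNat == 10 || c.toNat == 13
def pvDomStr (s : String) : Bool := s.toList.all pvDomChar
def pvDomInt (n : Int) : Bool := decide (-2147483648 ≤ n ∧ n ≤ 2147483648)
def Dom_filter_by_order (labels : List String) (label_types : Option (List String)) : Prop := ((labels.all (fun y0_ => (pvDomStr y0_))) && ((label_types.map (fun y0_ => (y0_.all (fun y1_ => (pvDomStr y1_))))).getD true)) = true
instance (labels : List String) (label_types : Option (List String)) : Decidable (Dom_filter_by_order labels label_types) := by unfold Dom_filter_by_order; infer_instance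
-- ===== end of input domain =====

-- ===== PORT A =====
-- B transposes A's type-major staged scans into one label-major pass taking the minimum matched type index (objective: alternative decomposition).
def fboA_has (labels : List String) (lt : String) : Bool :=
  labels.any (fun label => PySem.Str.startswith label lt)

def fboA_filter (labels : List String) (lt : String) : List String :=
  labels.map (fun label => if PySem.Str.startswith label lt then label else "$KEEP")

def fboA_loop (labels : List String) : List String → List String
  | [] => labels
  | lt :: rest =>
    if fboA_has labels lt then fboA_filter labels lt else fboA_loop labels rest

def filter_by_order (labels : List String) (label_types : Option (List String)) : List String :=
  fboA_loop labels (label_types.getD ["$APPEND", "$MERGE", "$TRANSFORM", "$REPLACE", "DELETE"])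

-- ===== PORT B =====
-- a label's first matching (index, type) among the types, starting at index i,
-- scanning only indices below the cutoff 'stop' (none = no cutoff)
def fboB_firstMatchTo (label : String) (stop : Option Nat) : List String → Nat → Option (Nat × String)
  | [], _ => none
  | t :: rest, i =>
    if (match stop with | some s => decide (s ≤ i) | none => false) then none
    else if PySem.Str.startswith label t then some (i, t)
    else fboB_firstMatchTo label stop rest (i + 1)

-- keep the candidate with the smaller index (earlier best wins ties)
def fboB_better (best cand : Option (Nat × String)) : Option (Nat × String) :=
  match cand with
  | none => best
  | some c =>
    match best with
    | none => some c
    | some b => if c.1 < b.1 then some c else some b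

def fboB_best (labels lts : List String) : Option (Nat × String) :=
  labels.foldl
    (fun best label => fboB_better best (fboB_firstMatchTo label (best.map Prod.fst) lts 0)) none

def filter_by_order_alt (labels : List String) (label_types : Option (List String)) : List String :=
  let lts := label_types.getD ["$APPEND", "$MERGE", "$TRANSFORM", "$REPLACE", "DELETE"]
  match fboB_best labels lts with
  | none => labels
  | some (_, t) => labels.map (fun label => if PySem.Str.startswith label t then label else "$KEEP")

-- ===== PRECONDITION & SPEC =====
def Spec_filter_by_order (labels : List String) (label_types : Option (List String)) (out : List String) : Prop := out = filter_by_order_alt labels label_types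
instance (labels : List String) (label_types : Option (List String)) (out : List String) : Decidable (Spec_filter_by_order labels label_types out) := by unfold Spec_filter_by_order; infer_instance

-- ===== CLAIM =====
def Claim_equal_filter_by_order : Prop := ∀ (labels : List String) (label_types : Option (List String)), Dom_filter_by_order labels label_types → Spec_filter_by_order labels label_types (filter_by_order labels label_types)

-- ===== LEMMAS AND PROOFS =====

-- unbounded first match (proof helper: the cutoff never changes the fold's outcome)
def fboB_firstMatch (label : String) : List String → Nat → Option (Nat × String)
  | [], _ => none
  | t :: rest, i => if PySem.Str.startswith label t then some (i, t) else fboB_firstMatch label rest (i + 1)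


-- type-major specification: first index ≥ i (with its type) whose type some label matches
def fboSpecFirst (labels : List String) : List String → Nat → Option (Nat × String)
  | [], _ => none
  | t :: rest, i => if fboA_has labels t then some (i, t) else fboSpecFirst labels rest (i + 1)

theorem fboA_loop_eq_spec (labels : List String) (lts : List String) : ∀ i : Nat,
    fboA_loop labels lts =
      (match fboSpecFirst labels lts i with
       | none => labels
       | some (_, t) => fboA_filter labels t) := by
  induction lts with
  | nil => intro i; rfl
  | cons t rest ih =>
    intro i
    simp only [fboA_loop, fboSpecFirst]
    by_cases h : fboA_has labels t
    · simp [h]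
    · simp [h, ih (i + 1)]

theorem fboB_firstMatch_ge (label : String) : ∀ (lts : List String) (i k : Nat) (v : String),
    fboB_firstMatch label lts i = some (k, v) → i ≤ k := by
  intro lts
  induction lts with
  | nil => intro i k v h; simp [fboB_firstMatch] at h
  | cons t rest ih =>
    intro i k v h
    simp only [fboB_firstMatch] at h
    by_cases hs : PySem.Str.startswith label t
    · rw [if_pos hs] at h
      cases h; omega
    · rw [if_neg hs] at h
      have := ih (i + 1) k v h; omega

theorem fboB_firstMatch_head (label t : String) (rest : List String) (i : Nat) (v : String)
    (h : fboB_firstMatch label (t :: rest) i = some (i, v)) : v = t := by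
  simp only [fboB_firstMatch] at h
  by_cases hs : PySem.Str.startswith label t
  · rw [if_pos hs] at h; cases h; rfl
  · rw [if_neg hs] at h
    have := fboB_firstMatch_ge label rest (i + 1) i v h; omega

-- the safety property an accumulator/candidate keeps throughout the fold (head case)
def fboP (i : Nat) (t : String) (o : Option (Nat × String)) : Prop :=
  ∀ k v, o = some (k, v) → i ≤ k ∧ (k = i → v = t)

theorem fboP_better {i : Nat} {t : String} {a b : Option (Nat × String)}
    (ha : fboP i t a) (hb : fboP i t b) : fboP i t (fboB_better a b) := by
  intro k v h
  cases b with
  | none => exact ha k v h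
  | some c =>
    cases a with
    | none => exact hb k v h
    | some bb =>
      simp only [fboB_better] at h
      split at h
      · exact hb k v h
      · exact ha k v h

theorem fboB_fold_min (i : Nat) (t : String) :
    ∀ (labels : List String) (f : String → Option (Nat × String)) (acc : Option (Nat × String)),
      (∀ l ∈ labels, fboP i t (f l)) → fboP i t acc →
      (acc = some (i, t) ∨ ∃ l ∈ labels, f l = some (i, t)) →
      labels.foldl (fun best label => fboB_better best (f label)) acc = some (i, t) := by
  intro labels
  induction labels with
  | nil =>
    intro f acc _ _ hex
    rcases hex with h | ⟨l, hl, _⟩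
    · simpa using h
    · simp at hl
  | cons l ls ih =>
    intro f acc hP hacc hex
    simp only [List.foldl_cons]
    have hPl : fboP i t (f l) := hP l (List.mem_cons_self ..)
    have hPls : ∀ x ∈ ls, fboP i t (f x) := fun x hx => hP x (List.mem_cons_of_mem _ hx)
    have hacc' : fboP i t (fboB_better acc (f l)) := fboP_better hacc hPl
    apply ih f _ hPls hacc'
    rcases hex with h | ⟨w, hw, hfw⟩
    · left
      subst h
      cases hfl : f l with
      | none => rfl
      | some c =>
        obtain ⟨k, v⟩ := c
        have := hPl k v hfl
        simp only [fboB_better]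
        have hnk : ¬ k < i := by omega
        simp [hnk]
    · rcases List.mem_cons.mp hw with rfl | hwls
      · left
        rw [hfw]
        cases acc with
        | none => rfl
        | some bb =>
          obtain ⟨k, v⟩ := bb
          have hk := hacc k v rfl
          simp only [fboB_better]
          by_cases hlt : i < k
          · simp [hlt]
          · have hki : k = i := by omega
            have hv : v = t := hk.2 hki
            subst hki; subst hv
            simp
      · exact Or.inr ⟨w, hwls, hfw⟩

theorem fboB_best_eq_spec (labels : List String) : ∀ (lts : List String) (i : Nat),
    labels.foldl (fun best label => fboB_better best (fboB_firstMatch label lts i)) none =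
      fboSpecFirst labels lts i := by
  intro lts
  induction lts with
  | nil =>
    intro i
    have : ∀ (acc : Option (Nat × String)),
        labels.foldl (fun best label => fboB_better best (fboB_firstMatch label ([] : List String) i)) acc = acc := by
      induction labels with
      | nil => intro acc; rfl
      | cons l ls ihl => intro acc; rw [List.foldl_cons]; exact ihl _
    exact this none
  | cons t rest ih =>
    intro i
    by_cases h : fboA_has labels t
    · -- some label matches t: the fold yields the head index i with type t
      have hP : ∀ l ∈ labels, fboP i t (fboB_firstMatch l (t :: rest) i) := by
        intro l _ k v hkv
        constructor
        · exact fboB_firstMatch_ge l (t :: rest) i k v hkv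
        · intro hk; exact fboB_firstMatch_head l t rest i v (hk ▸ hkv)
      obtain ⟨w, hw, hsw⟩ := List.any_eq_true.mp h
      have hexw : fboB_firstMatch w (t :: rest) i = some (i, t) := by
        have hsw' := hsw
        simp only [PySem.Str.startswith_eq] at hsw'
        simp [fboB_firstMatch, hsw']
      rw [fboB_fold_min i t labels _ none hP (by intro k v hkv; simp at hkv)
            (Or.inr ⟨w, hw, hexw⟩)]
      simp [fboSpecFirst, h]
    · -- no label matches t: each label's first match skips the head
      have hcong : ∀ (acc : Option (Nat × String)), ∀ l ∈ labels,
          fboB_better acc (fboB_firstMatch l (t :: rest) i) =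
            fboB_better acc (fboB_firstMatch l rest (i + 1)) := by
        intro acc l hl
        congr 1
        have hns : PySem.Str.startswith l t = false := by
          rw [Bool.eq_false_iff]
          intro hs
          exact h (List.any_eq_true.mpr ⟨l, hl, hs⟩)
        simp only [PySem.Str.startswith_eq] at hns
        simp [fboB_firstMatch, hns]
      rw [PySem.List.foldl_congr_mem labels _
            (fun best label => fboB_better best (fboB_firstMatch label rest (i + 1))) none hcong,
          ih (i + 1)]
      simp [fboSpecFirst, h]

theorem fboB_firstMatchTo_none (label : String) (lts : List String) : ∀ i : Nat,
    fboB_firstMatchTo label none lts i = fboB_firstMatch label lts i := by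
  induction lts with
  | nil => intro i; rfl
  | cons t rest ih =>
    intro i
    simp only [fboB_firstMatchTo, fboB_firstMatch, Bool.false_eq_true, if_false, ih (i + 1)]

theorem fboB_firstMatchTo_some (label : String) (s : Nat) (lts : List String) : ∀ i : Nat,
    fboB_firstMatchTo label (some s) lts i =
      (match fboB_firstMatch label lts i with
       | none => none
       | some (k, v) => if k < s then some (k, v) else none) := by
  induction lts with
  | nil => intro i; rfl
  | cons t rest ih =>
    intro i
    simp only [fboB_firstMatchTo, fboB_firstMatch]
    by_cases hsi : s ≤ i
    · simp only [hsi, decide_true, if_true]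
      by_cases hsw : PySem.Str.startswith label t = true
      · rw [if_pos hsw]
        have : ¬ i < s := by omega
        simp [this]
      · rw [if_neg hsw]
        cases hm : fboB_firstMatch label rest (i + 1) with
        | none => rfl
        | some c =>
          obtain ⟨k, v⟩ := c
          have := fboB_firstMatch_ge label rest (i + 1) k v hm
          have hks : ¬ k < s := by omega
          simp [hks]
    · simp only [decide_eq_true_eq, if_neg hsi]
      by_cases hsw : PySem.Str.startswith label t = true
      · rw [if_pos hsw, if_pos hsw]
        have : i < s := by omega
        simp [this]
      · rw [if_neg hsw, if_neg hsw, ih (i + 1)]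

-- the cutoff never changes a fold step's outcome
theorem fboB_step_eq (lts : List String) (label : String) (best : Option (Nat × String)) (i : Nat) :
    fboB_better best (fboB_firstMatchTo label (best.map Prod.fst) lts i) =
      fboB_better best (fboB_firstMatch label lts i) := by
  cases best with
  | none => rw [Option.map_none, fboB_firstMatchTo_none]
  | some b =>
    obtain ⟨bi, bt⟩ := b
    rw [Option.map_some, fboB_firstMatchTo_some]
    cases hm : fboB_firstMatch label lts i with
    | none => rfl
    | some c =>
      obtain ⟨k, v⟩ := c
      by_cases hk : k < bi
      · simp [fboB_better, hk]
      · simp [fboB_better, hk]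

theorem fbo_main_eq (labels lts : List String) :
    fboA_loop labels lts =
      (match fboB_best labels lts with
       | none => labels
       | some (_, t) => labels.map (fun label => if PySem.Str.startswith label t then label else "$KEEP")) := by
  unfold fboB_best
  rw [PySem.List.foldl_congr_mem labels _
        (fun best label => fboB_better best (fboB_firstMatch label lts 0)) none
        (fun acc l _ => fboB_step_eq lts l acc 0),
      fboB_best_eq_spec labels lts 0, fboA_loop_eq_spec labels lts 0]
  cases h : fboSpecFirst labels lts 0 with
  | none => rfl
  | some p => obtain ⟨k, t⟩ := p; rfl

-- ===== VERDICT =====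
theorem filter_by_order_spec : Claim_equal_filter_by_order := by
  intro labels label_types _
  unfold Spec_filter_by_order filter_by_order filter_by_order_alt
  exact fbo_main_eq labels _
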